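-- pv_equiv track=rewrite | github.com/somekindofpast/py-bites-regular-bites | string/uppercase_vowels.py | uppercase_vowels
-- ===== SOURCE A (Python) =====
-- VOWELS = "aeiou"
--
-- EXTENSIONS = [".mp3", ".jpg", ".jpeg", ".pdf", ".txt", ".mp4", ".png", ".exe"]
--
-- def uppercase_vowels(text: str) -> str:
--     result = ""
--     for i in range(len(text)):
--         if text[i] == '.' and text[i:] in EXTENSIONS:
--             result += text[i:]
--             break
--         elif text[i].isalpha():
--             if text[i].lower() in VOWELS:
--                 result += text[i].upper()
--             else:
--                 result += text[i].lower()
--         else: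
--             result += ' '
--     return result
-- ===== SOURCE B (Python) =====
-- VOWELS = "aeiou"
--
-- EXTENSIONS = [".mp3", ".jpg", ".jpeg", ".pdf", ".txt", ".mp4", ".png", ".exe"]
--
-- def uppercase_vowels(text: str) -> str:
--     split = len(text)
--     for ext in EXTENSIONS:
--         if text.endswith(ext):
--             split = len(text) - len(ext)
--             break
--     body = ''.join(
--         (c.upper() if c.lower() in VOWELS else c.lower()) if c.isalpha() else ' '
--         for c in text[:split]
--     )
--     return body + text[split:]
-- ===== Notes on version B (the rewrite author's own statement) =====
-- stated objective: alternative
-- what changed: B separates the work into two phases: it first locates the extension split point with endswith over EXTENSIONS, then transforms only the prefix with a joined comprehension and appends the suffix unchanged, instead of A's single indexed loop that slices and membership-tests text[i:] at every character and builds the result by repeated string concatenation; equivalence rests on no extension being a suffix of another.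
import Mathlib
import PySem

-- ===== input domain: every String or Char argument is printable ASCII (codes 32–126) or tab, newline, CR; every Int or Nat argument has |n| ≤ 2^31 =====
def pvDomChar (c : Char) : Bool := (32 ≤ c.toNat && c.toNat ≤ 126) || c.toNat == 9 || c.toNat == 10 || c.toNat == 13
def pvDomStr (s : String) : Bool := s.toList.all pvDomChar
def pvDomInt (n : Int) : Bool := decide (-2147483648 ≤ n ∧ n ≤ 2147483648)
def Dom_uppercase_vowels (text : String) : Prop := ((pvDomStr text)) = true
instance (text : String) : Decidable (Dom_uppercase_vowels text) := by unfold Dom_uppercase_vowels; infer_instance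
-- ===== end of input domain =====

-- B separates extension-detection (endswith scan) from the character transformation of the prefix,
-- instead of A's single indexed loop that tests text[i:] for membership at every character; return values are equal.

-- ===== PORT A =====
def pvVOWELS : List Char := "aeiou".toList

def pvEXTENSIONS : List (List Char) :=
  [".mp3".toList, ".jpg".toList, ".jpeg".toList, ".pdf".toList,
   ".txt".toList, ".mp4".toList, ".png".toList, ".exe".toList]

-- the per-character transformation shared by both branches of A's loop body
def pvTr (c : Char) : Char :=
  if PySem.Chars.isalpha c then
    (if pvVOWELS.contains (PySem.Chars.lowerChar c) then PySem.Chars.upperChar c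
     else PySem.Chars.lowerChar c)
  else ' '

-- A's loop over i in range(len(text)): at step i the remaining suffix text[i:] is the argument
def pvGoA : List Char → List Char
  | [] => []
  | c :: rest =>
    if c = '.' ∧ (c :: rest) ∈ pvEXTENSIONS then c :: rest
    else pvTr c :: pvGoA rest

def uppercase_vowels (text : String) : String := String.mk (pvGoA text.toList)

-- ===== PORT B =====
-- the for-ext loop with break: first extension text ends with gives the split point, else len(text)
def pvFindSplit (cs : List Char) : List (List Char) → Nat
  | [] => cs.length
  | e :: es => if e.isSuffixOf cs then cs.length - e.length else pvFindSplit cs es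

def uppercase_vowels_alt (text : String) : String :=
  let cs := text.toList
  let split := pvFindSplit cs pvEXTENSIONS
  String.mk ((cs.take split).map pvTr ++ cs.drop split)

-- ===== PRECONDITION & SPEC =====
def Spec_uppercase_vowels (text : String) (out : String) : Prop := out = uppercase_vowels_alt text
instance (text : String) (out : String) : Decidable (Spec_uppercase_vowels text out) := by unfold Spec_uppercase_vowels; infer_instance

-- ===== CLAIM (what is proved, stated in full; the proofs are below) =====
def Claim_equal_uppercase_vowels : Prop := ∀ (text : String), Dom_uppercase_vowels text → Spec_uppercase_vowels text (uppercase_vowels text)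

-- ===== LEMMAS AND PROOFS =====

-- if cs itself is an extension, the first endswith match is cs, so the split is 0
theorem pvFindSplit_mem (cs : List Char) (h : cs ∈ pvEXTENSIONS) :
    pvFindSplit cs pvEXTENSIONS = 0 := by
  fin_cases h <;> decide

-- every extension starts with '.'
theorem pvExt_head : ∀ e ∈ pvEXTENSIONS, e.head? = some '.' := by decide

theorem pvFindSplit_cons (c : Char) (rest : List Char) :
    ∀ es : List (List Char), (∀ e ∈ es, e ≠ c :: rest) →
      pvFindSplit (c :: rest) es = pvFindSplit rest es + 1 := by
  intro es
  induction es with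
  | nil => intro _; simp [pvFindSplit]
  | cons e es ih =>
    intro h
    by_cases hs : e.isSuffixOf (c :: rest) = true
    · have hsuf : e <:+ c :: rest := List.isSuffixOf_iff_suffix.mp hs
      have hne : e ≠ c :: rest := h e (List.mem_cons_self)
      have hsuf' : e <:+ rest := by
        rcases List.suffix_cons_iff.mp hsuf with h' | h'
        · exact absurd h' hne
        · exact h'
      have hlen : e.length ≤ rest.length := hsuf'.length_le
      simp [pvFindSplit, hs, List.isSuffixOf_iff_suffix.mpr hsuf']
      omega
    · have hs' : ¬ e.isSuffixOf rest = true := by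
        intro h'
        exact hs (List.isSuffixOf_iff_suffix.mpr
          (List.suffix_cons_iff.mpr (Or.inr (List.isSuffixOf_iff_suffix.mp h'))))
      simp [pvFindSplit, hs, hs']
      exact ih (fun e he => h e (List.mem_cons_of_mem _ he))

theorem pvGoA_eq (cs : List Char) :
    pvGoA cs = (cs.take (pvFindSplit cs pvEXTENSIONS)).map pvTr
                 ++ cs.drop (pvFindSplit cs pvEXTENSIONS) := by
  induction cs with
  | nil => decide
  | cons c rest ih =>
    by_cases h : c = '.' ∧ (c :: rest) ∈ pvEXTENSIONS
    · rw [show pvGoA (c :: rest) = c :: rest from if_pos h,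
        pvFindSplit_mem _ h.2, List.take_zero, List.drop_zero, List.map_nil,
        List.nil_append]
    · have hmem : (c :: rest) ∉ pvEXTENSIONS := by
        intro hm
        have := pvExt_head _ hm
        simp at this
        exact h ⟨this, hm⟩
      have hsplit := pvFindSplit_cons c rest pvEXTENSIONS
        (fun e he heq => hmem (heq ▸ he))
      rw [show pvGoA (c :: rest) = pvTr c :: pvGoA rest by simp [pvGoA, h],
        hsplit, List.take_succ_cons, List.drop_succ_cons, List.map_cons, ih]
      simp

-- ===== VERDICT (by name: the statement is the Claim_ definition above) =====
theorem uppercase_vowels_spec : Claim_equal_uppercase_vowels := by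
  intro text _
  unfold Spec_uppercase_vowels uppercase_vowels uppercase_vowels_alt
  rw [pvGoA_eq]
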